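-- pv_equiv track=rewrite | github.com/ocampor/pivot-table-to-csv | utils/spreadsheetml_parser.py | split_xml
-- ===== SOURCE A (Python) =====
-- def split_xml(xml, n_batches=5):
--     cut_size = int(len(xml) / n_batches)
--     start_index = 0
--     xml_chunks = []
--     for idx in range(cut_size, len(xml), cut_size):
--         cut_index = _get_next_valid_index(xml, idx)
--         xml_chunks += [xml[start_index: cut_index]]
--         start_index = cut_index
--     return xml_chunks
--
-- def _get_next_valid_index(xml, seed, close_tag="</r>"):
--     while xml[seed:seed + len(close_tag)] != close_tag:
--         seed += 1
--         if seed >= len(xml):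
--             return len(xml)
--     return seed + len(close_tag)
-- ===== SOURCE B (Python) =====
-- def split_xml(xml, n_batches=5):
--     close_tag = "</r>"
--     n = len(xml)
--     cut_size = int(n / n_batches)
--     # index table: every position where a close tag starts, in increasing order
--     starts = [i for i in range(n) if xml[i:i + 4] == close_tag]
--     chunks = []
--     start = 0
--     for idx in range(cut_size, n, cut_size):
--         # binary search: first tag start >= idx
--         lo, hi = 0, len(starts)
--         while lo < hi:
--             mid = (lo + hi) // 2
--             if starts[mid] < idx:
--                 lo = mid + 1
--             else:
--                 hi = mid
--         cut = starts[lo] + 4 if lo < len(starts) else n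
--         chunks.append(xml[start:cut])
--         start = cut
--     return chunks
-- ===== Notes on version B (the rewrite author's own statement) =====
-- stated objective: faster
-- what changed: B precomputes the sorted table of all close-tag start positions in one pass and replaces A's per-cut character-by-character forward rescan with a hand-written binary search over that table (same outer chunking loop, same return value).
import Mathlib
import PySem

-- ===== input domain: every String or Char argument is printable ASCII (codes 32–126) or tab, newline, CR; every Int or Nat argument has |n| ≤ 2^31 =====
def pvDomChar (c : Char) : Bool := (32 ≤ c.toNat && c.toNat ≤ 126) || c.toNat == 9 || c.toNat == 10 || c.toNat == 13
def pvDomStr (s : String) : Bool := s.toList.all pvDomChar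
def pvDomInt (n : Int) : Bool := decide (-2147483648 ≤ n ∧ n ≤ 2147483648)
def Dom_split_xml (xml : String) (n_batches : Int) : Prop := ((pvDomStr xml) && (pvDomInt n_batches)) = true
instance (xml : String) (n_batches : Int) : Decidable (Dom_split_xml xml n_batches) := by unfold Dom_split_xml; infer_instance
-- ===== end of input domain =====

-- B replaces A's per-cut character-by-character scan for the next close tag by a precomputed
-- table of tag-start positions queried with a hand-written binary search (measured faster;
-- same outer chunking loop, same return value).

-- ===== PORT A =====
-- _get_next_valid_index's while loop; fuel (= len(xml)) only makes the recursion total,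
-- it is never exhausted when the loop is entered with 0 ≤ seed (see gnvi_eq below).
def splitXmlGnvi (xs : List Char) : Int → Nat → Int
  | seed, fuel =>
    if PySem.List.slice xs (some seed) (some (seed + 4)) = ['<', '/', 'r', '>'] then
      seed + 4
    else if (xs.length : Int) ≤ seed + 1 then
      (xs.length : Int)
    else
      match fuel with
      | 0 => (xs.length : Int)
      | f + 1 => splitXmlGnvi xs (seed + 1) f

def split_xml (xml : String) (n_batches : Int) : List String :=
  let xs := xml.toList
  let cut_size := PySem.Int.truncdiv (PySem.Str.len xml) n_batches
  let st := (PySem.List.pyRange cut_size (PySem.Str.len xml) cut_size).foldl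
    (fun (st : Int × List String) idx =>
      let cut_index := splitXmlGnvi xs idx xs.length
      (cut_index, st.2 ++ [String.ofList (PySem.List.slice xs (some st.1) (some cut_index))]))
    (0, [])
  st.2

-- ===== PORT B =====
-- the hand-written binary-search loop of Source B (lo, hi : Nat; all accesses are in range)
def splitXmlBisect (starts : List Int) (idx : Int) : Nat → Nat → Nat
  | lo, hi =>
    if h : lo < hi then
      let mid := (lo + hi) / 2
      if starts.getD mid 0 < idx then splitXmlBisect starts idx (mid + 1) hi
      else splitXmlBisect starts idx lo mid
    else lo
  termination_by lo hi => hi - lo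
  decreasing_by all_goals omega

def split_xml_alt (xml : String) (n_batches : Int) : List String :=
  let xs := xml.toList
  let n := PySem.Str.len xml
  let cut_size := PySem.Int.truncdiv n n_batches
  let starts := (PySem.List.pyRange 0 n 1).filter
    (fun i => decide (PySem.List.slice xs (some i) (some (i + 4)) = ['<', '/', 'r', '>']))
  let st := (PySem.List.pyRange cut_size n cut_size).foldl
    (fun (st : Int × List String) idx =>
      let lo := splitXmlBisect starts idx 0 starts.length
      let cut := if lo < starts.length then starts.getD lo 0 + 4 else n
      (cut, st.2 ++ [String.ofList (PySem.List.slice xs (some st.1) (some cut))]))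
    (0, [])
  st.2

-- ===== PRECONDITION & SPEC =====
-- Python A raises on exactly these inputs: ZeroDivisionError for n_batches = 0 and
-- ValueError (range step 0) when int(len(xml)/n_batches) = 0; truncdiv _ 0 = 0 covers both.
def Pre_split_xml (xml : String) (n_batches : Int) : Prop :=
  PySem.Int.truncdiv (PySem.Str.len xml) n_batches ≠ 0
instance (xml : String) (n_batches : Int) : Decidable (Pre_split_xml xml n_batches) := by
  unfold Pre_split_xml; infer_instance

def pvWitness_split_xml : String × Int := ("ab</r>cd</r>", 2)

def Spec_split_xml (xml : String) (n_batches : Int) (out : List String) : Prop := out = split_xml_alt xml n_batches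
instance (xml : String) (n_batches : Int) (out : List String) : Decidable (Spec_split_xml xml n_batches out) := by unfold Spec_split_xml; infer_instance

-- ===== CLAIM (what is proved, stated in full; the proofs are below) =====
def Claim_equal_split_xml : Prop := ∀ (xml : String) (n_batches : Int), Dom_split_xml xml n_batches → Pre_split_xml xml n_batches → Spec_split_xml xml n_batches (split_xml xml n_batches)

-- ===== LEMMAS AND PROOFS =====

-- the tag-start table of port B, as a standalone value
def sxStarts (xs : List Char) : List Int :=
  (PySem.List.pyRange 0 (xs.length : Int) 1).filter
    (fun i => decide (PySem.List.slice xs (some i) (some (i + 4)) = ['<', '/', 'r', '>']))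

lemma sx_mem_starts (xs : List Char) (i : Int) :
    i ∈ sxStarts xs ↔
      0 ≤ i ∧ i < (xs.length : Int) ∧
        PySem.List.slice xs (some i) (some (i + 4)) = ['<', '/', 'r', '>'] := by
  simp [sxStarts, List.mem_filter, PySem.List.mem_pyRange_one]
  tauto

lemma sx_sorted (xs : List Char) : (sxStarts xs).Pairwise (· < ·) :=
  (PySem.List.pairwise_lt_pyRange_one 0 (xs.length : Int)).filter _

-- a match at a nonnegative position fits inside the string
lemma sx_match_bound (xs : List Char) (i : Int) (h0 : 0 ≤ i)
    (hm : PySem.List.slice xs (some i) (some (i + 4)) = ['<', '/', 'r', '>']) :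
    i + 4 ≤ (xs.length : Int) := by
  have hlen := congrArg List.length hm
  rw [PySem.List.length_slice] at hlen
  simp only [PySem.List.clampIdx] at hlen
  rw [if_neg (show ¬(i + 4 < 0) by omega), if_neg (show ¬(i < 0) by omega)] at hlen
  simp only [List.length_cons, List.length_nil] at hlen
  omega

lemma find?_congr_mem {α : Type} (l : List α) (p q : α → Bool)
    (h : ∀ x ∈ l, p x = q x) : l.find? p = l.find? q := by
  induction l with
  | nil => rfl
  | cons a t ih =>
    simp only [List.find?]
    rw [h a (by simp)]
    cases q a
    · exact ih fun x hx => h x (by simp [hx])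
    · rfl

lemma find?_sorted_self (a : Int) : ∀ (l : List Int), l.Pairwise (· < ·) → a ∈ l →
    l.find? (fun q => decide (a ≤ q)) = some a := by
  intro l hs ha
  induction l with
  | nil => simp at ha
  | cons b t ih =>
    rcases List.mem_cons.mp ha with rfl | hat
    · rw [List.find?_cons_of_pos (by simp)]
    · have hlt : b < a := (List.pairwise_cons.mp hs).1 a hat
      rw [List.find?_cons_of_neg (by simp; omega)]
      exact ih (List.pairwise_cons.mp hs).2 hat

lemma find?_eq_of_cut (p : Int → Bool) :
    ∀ (l : List Int) (r : Nat), r ≤ l.length →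
    (∀ j, j < r → p (l.getD j 0) = false) →
    (r < l.length → p (l.getD r 0) = true) →
    l.find? p = l[r]? := by
  intro l
  induction l with
  | nil => intro r hr _ _; simp at hr; simp [hr]
  | cons a t ih =>
    intro r hr hlt hge
    cases r with
    | zero =>
      have := hge (by simp)
      simp at this
      simp [List.find?, this]
    | succ r' =>
      have h0 : p a = false := by have := hlt 0 (by omega); simpa using this
      simp only [List.find?, h0]
      have := ih r' (by simpa using hr)
        (fun j hj => by have := hlt (j + 1) (by omega); simpa using this)
        (fun hr' => by have := hge (by simpa using hr'); simpa using this)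
      simpa using this

-- A's while loop computes "first tag start ≥ seed, plus 4, else len"
lemma gnvi_eq (xs : List Char) : ∀ (fuel : Nat) (seed : Int), 0 ≤ seed →
    (xs.length : Int) - seed ≤ fuel →
    splitXmlGnvi xs seed fuel =
      (match (sxStarts xs).find? (fun q => decide (seed ≤ q)) with
       | some q => q + 4
       | none => (xs.length : Int)) := by
  intro fuel
  induction fuel with
  | zero =>
    intro seed h0 hf
    rw [splitXmlGnvi]
    by_cases hm : PySem.List.slice xs (some seed) (some (seed + 4)) = ['<', '/', 'r', '>']
    · rw [if_pos hm]
      have hmem : seed ∈ sxStarts xs := by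
        rw [sx_mem_starts]
        exact ⟨h0, by have := sx_match_bound xs seed h0 hm; omega, hm⟩
      rw [find?_sorted_self seed _ (sx_sorted xs) hmem]
    · rw [if_neg hm, if_pos (by omega)]
      rw [List.find?_eq_none.mpr ?_]
      intro q hq
      rw [sx_mem_starts] at hq
      simp only [decide_eq_true_eq]
      intro hle
      rcases eq_or_lt_of_le hle with rfl | hlt
      · exact hm hq.2.2
      · omega
  | succ f ih =>
    intro seed h0 hf
    rw [splitXmlGnvi]
    by_cases hm : PySem.List.slice xs (some seed) (some (seed + 4)) = ['<', '/', 'r', '>']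
    · rw [if_pos hm]
      have hmem : seed ∈ sxStarts xs := by
        rw [sx_mem_starts]
        exact ⟨h0, by have := sx_match_bound xs seed h0 hm; omega, hm⟩
      rw [find?_sorted_self seed _ (sx_sorted xs) hmem]
    · rw [if_neg hm]
      by_cases hend : (xs.length : Int) ≤ seed + 1
      · rw [if_pos hend]
        rw [List.find?_eq_none.mpr ?_]
        intro q hq
        rw [sx_mem_starts] at hq
        simp only [decide_eq_true_eq]
        intro hle
        rcases eq_or_lt_of_le hle with rfl | hlt
        · exact hm hq.2.2
        · omega
      · rw [if_neg hend]
        rw [ih (seed + 1) (by omega) (by omega)]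
        congr 1
        apply find?_congr_mem
        intro q hq
        rw [sx_mem_starts] at hq
        have hne : q ≠ seed := fun h => hm (h ▸ hq.2.2)
        simp only [decide_eq_decide]
        omega

lemma sorted_getD_mono (l : List Int) (hs : l.Pairwise (· < ·)) (j k : Nat)
    (hjk : j ≤ k) (hk : k < l.length) : l.getD j 0 ≤ l.getD k 0 := by
  rcases eq_or_lt_of_le hjk with rfl | hlt
  · exact le_refl _
  · have := List.pairwise_iff_getElem.mp hs j k (by omega) hk hlt
    rw [List.getD_eq_getElem l 0 (by omega), List.getD_eq_getElem l 0 hk]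
    omega

-- Source B's binary search returns the least index whose table entry is ≥ idx
lemma bisect_spec (starts : List Int) (idx : Int) (hs : starts.Pairwise (· < ·)) :
    ∀ (lo hi : Nat), lo ≤ hi → hi ≤ starts.length →
    (∀ j, j < lo → starts.getD j 0 < idx) →
    (∀ j, hi ≤ j → j < starts.length → idx ≤ starts.getD j 0) →
    (splitXmlBisect starts idx lo hi ≤ starts.length ∧
     (∀ j, j < splitXmlBisect starts idx lo hi → starts.getD j 0 < idx) ∧
     (splitXmlBisect starts idx lo hi < starts.length →
       idx ≤ starts.getD (splitXmlBisect starts idx lo hi) 0)) := by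
  have main : ∀ (k lo hi : Nat), hi - lo ≤ k → lo ≤ hi → hi ≤ starts.length →
      (∀ j, j < lo → starts.getD j 0 < idx) →
      (∀ j, hi ≤ j → j < starts.length → idx ≤ starts.getD j 0) →
      (splitXmlBisect starts idx lo hi ≤ starts.length ∧
       (∀ j, j < splitXmlBisect starts idx lo hi → starts.getD j 0 < idx) ∧
       (splitXmlBisect starts idx lo hi < starts.length →
         idx ≤ starts.getD (splitXmlBisect starts idx lo hi) 0)) := by
    intro k
    induction k with
    | zero =>
      intro lo hi hk hle hhi hbelow habove
      rw [splitXmlBisect, dif_neg (by omega)]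
      exact ⟨by omega, hbelow, fun hlt => habove lo (by omega) hlt⟩
    | succ k ih =>
      intro lo hi hk hle hhi hbelow habove
      rw [splitXmlBisect]
      by_cases h : lo < hi
      · rw [dif_pos h]
        simp only
        by_cases hc : starts.getD ((lo + hi) / 2) 0 < idx
        · rw [if_pos hc]
          exact ih ((lo + hi) / 2 + 1) hi (by omega) (by omega) hhi
            (fun j hj => by
              by_cases hjlo : j < lo
              · exact hbelow j hjlo
              · exact lt_of_le_of_lt
                  (sorted_getD_mono starts hs j ((lo + hi) / 2) (by omega) (by omega)) hc)
            habove
        · rw [if_neg hc]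
          exact ih lo ((lo + hi) / 2) (by omega) (by omega) (by omega) hbelow
            (fun j hj1 hj2 =>
              le_trans (le_of_not_gt hc) (sorted_getD_mono starts hs ((lo + hi) / 2) j hj1 hj2))
      · rw [dif_neg h]
        exact ⟨by omega, hbelow, fun hlt => habove lo (by omega) hlt⟩
  intro lo hi
  exact main (hi - lo) lo hi (le_refl _)

-- per-index agreement of the two cut computations
lemma cut_eq (xs : List Char) (idx : Int) (h0 : 0 ≤ idx) :
    splitXmlGnvi xs idx xs.length =
      (if splitXmlBisect (sxStarts xs) idx 0 (sxStarts xs).length < (sxStarts xs).length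
       then (sxStarts xs).getD (splitXmlBisect (sxStarts xs) idx 0 (sxStarts xs).length) 0 + 4
       else (xs.length : Int)) := by
  rw [gnvi_eq xs xs.length idx h0 (by omega)]
  obtain ⟨hr1, hr2, hr3⟩ := bisect_spec (sxStarts xs) idx (sx_sorted xs) 0 (sxStarts xs).length
    (by omega) (le_refl _) (by omega) (by omega)
  set r := splitXmlBisect (sxStarts xs) idx 0 (sxStarts xs).length with hrdef
  rw [find?_eq_of_cut _ _ r hr1
    (fun j hj => by simpa using not_le.mpr (hr2 j hj))
    (fun hlt => by simpa using hr3 hlt)]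
  by_cases hlt : r < (sxStarts xs).length
  · rw [if_pos hlt, List.getElem?_eq_getElem hlt, List.getD_eq_getElem _ 0 hlt]
  · rw [if_neg hlt, List.getElem?_eq_none (by omega)]

lemma pyRange_nil_of_neg (a b s : Int) (hs : s < 0) (hab : a ≤ b) :
    PySem.List.pyRange a b s = [] := by
  rw [PySem.List.pyRange]
  rw [if_neg (by omega)]
  simp only
  rw [if_neg (by omega), if_neg (by omega)]
  rfl

-- ===== VERDICT (by name: the statement is the Claim_ definition above) =====
theorem split_xml_spec : Claim_equal_split_xml := by
  intro xml n_batches _hdom hpre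
  unfold Spec_split_xml split_xml split_xml_alt
  simp only [PySem.Str.len_eq]
  set xs := xml.toList with hxs
  set c := PySem.Int.truncdiv (xs.length : Int) n_batches with hc
  have hpre' : c ≠ 0 := by
    unfold Pre_split_xml at hpre; rw [PySem.Str.len_eq] at hpre; exact hpre
  rcases lt_trichotomy c 0 with hneg | hzero | hpos
  · rw [pyRange_nil_of_neg c (xs.length : Int) c hneg (by omega)]
    rfl
  · exact absurd hzero hpre'
  · congr 1
    apply PySem.List.foldl_congr_mem
    intro acc idx hmem
    obtain ⟨hge, -, -⟩ := (PySem.List.mem_pyRange_iff_of_pos hpos idx).mp hmem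
    have h0 : 0 ≤ idx := by omega
    rw [cut_eq xs idx h0]
    rfl
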